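-- pv_equiv track=rewrite | github.com/matrxi999/Program_analysis_brainfuck | GPTtranspilerMain.py | optimize_successive_loops
-- ===== SOURCE A (Python) =====
-- def optimize_successive_loops(sourcecode):
--     """Optimize successive loops in Brainfuck code."""
--     optimized_code = ""
--     i = 0
--
--     while i < len(sourcecode):
--         # Check for successive loops pattern
--         if sourcecode[i] == ']' and i + 1 < len(sourcecode) and sourcecode[i + 1] == '[':
--             # Skip the next loop
--             optimized_code += sourcecode[i]
--             i += 2
--             loop_lvl = 1
--             while i < len(sourcecode) and loop_lvl > 0:
--                 if sourcecode[i] == '[':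
--                     loop_lvl += 1
--                 elif sourcecode[i] == ']':
--                     loop_lvl -= 1
--                 i += 1
--         else:
--             optimized_code += sourcecode[i]
--             i += 1
--     return optimized_code
-- ===== SOURCE B (Python) =====
-- def optimize_successive_loops(sourcecode):
--     """Optimize successive loops in Brainfuck code (single-pass state machine)."""
--     out = []
--     skip = 0            # > 0: depth inside a loop being deleted
--     after_close = False # last emitted character was a ']'
--     for c in sourcecode:
--         if skip > 0:
--             if c == '[':
--                 skip += 1
--             elif c == ']':
--                 skip -= 1
--         elif after_close and c == '[':
--             skip = 1
--             after_close = False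
--         else:
--             out.append(c)
--             after_close = (c == ']')
--     return ''.join(out)
-- ===== Notes on version B (the rewrite author's own statement) =====
-- stated objective: faster
-- what changed: Replaced the index-based while loop (with an inner depth-counting skip loop, one-character lookahead and repeated string concatenation) by a single linear pass driven by an explicit state machine (skip depth + after-close flag) that appends to a list and joins once.
import Mathlib
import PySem

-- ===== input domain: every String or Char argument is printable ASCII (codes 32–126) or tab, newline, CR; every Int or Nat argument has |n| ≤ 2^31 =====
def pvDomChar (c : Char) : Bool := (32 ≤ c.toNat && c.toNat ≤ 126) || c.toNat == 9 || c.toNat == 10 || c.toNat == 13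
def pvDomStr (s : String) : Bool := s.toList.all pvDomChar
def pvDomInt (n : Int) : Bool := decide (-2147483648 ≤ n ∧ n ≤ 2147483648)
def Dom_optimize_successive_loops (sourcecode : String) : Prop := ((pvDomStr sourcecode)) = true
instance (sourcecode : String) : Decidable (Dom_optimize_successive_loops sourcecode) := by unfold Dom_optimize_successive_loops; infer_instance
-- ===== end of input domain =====

-- B replaces A's nested index-based loops, lookahead and repeated string concatenation by
-- one linear pass with an explicit state machine (skip depth + after-close flag) appending
-- to a list joined once; a timing run measured B faster.

-- ===== PORT A =====
-- A's inner while: from the current position, with loop_lvl, consume characters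
-- adjusting the level; returns the remaining suffix once the level reaches 0 (or end).
def aSkip : Nat → List Char → List Char
  | _, [] => []
  | lvl, c :: rest =>
      if c = '[' then aSkip (lvl + 1) rest
      else if c = ']' then (if lvl = 1 then rest else aSkip (lvl - 1) rest)
      else aSkip lvl rest

theorem aSkip_length_le (lvl : Nat) (cs : List Char) : (aSkip lvl cs).length ≤ cs.length := by
  induction cs generalizing lvl with
  | nil => simp [aSkip]
  | cons c rest ih =>
      simp only [aSkip]
      split_ifs <;> simp <;> exact Nat.le_succ_of_le (ih _)

-- A's outer while over the remaining characters: the pattern "][" emits ']' and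
-- skips the following loop (i += 2 then the inner loop), anything else is copied.
def aLoop : List Char → List Char
  | [] => []
  | ']' :: '[' :: rest => ']' :: aLoop (aSkip 1 rest)
  | c :: rest => c :: aLoop rest
termination_by cs => cs.length
decreasing_by
  · simpa using Nat.lt_succ_of_le (Nat.le_succ_of_le (aSkip_length_le 1 rest))
  · simp

def optimize_successive_loops (sourcecode : String) : String :=
  String.ofList (aLoop sourcecode.toList)

-- ===== PORT B =====
-- One pass; state: skip (depth inside a deleted loop, 0 = copying) and
-- afterClose (last emitted character was ']').
def bGo : Nat → Bool → List Char → List Char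
  | _, _, [] => []
  | skip, ac, c :: rest =>
      if 0 < skip then
        if c = '[' then bGo (skip + 1) ac rest
        else if c = ']' then bGo (skip - 1) ac rest
        else bGo skip ac rest
      else if ac ∧ c = '[' then bGo 1 false rest
      else c :: bGo 0 (c = ']') rest

def optimize_successive_loops_alt (sourcecode : String) : String :=
  String.ofList (bGo 0 false sourcecode.toList)

-- ===== PRECONDITION & SPEC =====
def Spec_optimize_successive_loops (sourcecode : String) (out : String) : Prop := out = optimize_successive_loops_alt sourcecode
instance (sourcecode : String) (out : String) : Decidable (Spec_optimize_successive_loops sourcecode out) := by unfold Spec_optimize_successive_loops; infer_instance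

-- ===== CLAIM (what is proved, stated in full; the proofs are below) =====
def Claim_equal_optimize_successive_loops : Prop := ∀ (sourcecode : String), Dom_optimize_successive_loops sourcecode → Spec_optimize_successive_loops sourcecode (optimize_successive_loops sourcecode)

-- ===== LEMMAS AND PROOFS =====

-- While skipping, B drops exactly the characters A's inner loop consumes.
theorem bGo_skip (cs : List Char) : ∀ lvl : Nat, 0 < lvl →
    bGo lvl false cs = bGo 0 false (aSkip lvl cs) := by
  induction cs with
  | nil => intro lvl h; simp [bGo, aSkip]
  | cons c rest ih =>
      intro lvl h
      simp only [bGo, aSkip, if_pos h]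
      by_cases hb : c = '['
      · simp only [if_pos hb]; exact ih _ (by omega)
      · simp only [if_neg hb]
        by_cases hc : c = ']'
        · simp only [if_pos hc]
          by_cases h1 : lvl = 1
          · subst h1; simp
          · simp only [if_neg h1]; exact ih _ (by omega)
        · simp only [if_neg hc]; exact ih _ h

-- A's catch-all copy case, as an unconditional equation.
theorem aLoop_cons (c : Char) (rest : List Char)
    (h : ∀ r, c = ']' → rest = '[' :: r → False) :
    aLoop (c :: rest) = c :: aLoop rest := by
  rw [aLoop.eq_def]
  split
  · rename_i heq; exact absurd heq (by simp)
  · rename_i r heq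
    obtain ⟨h1, h2⟩ := List.cons.inj heq
    exact (h r h1 h2).elim
  · rename_i heq
    obtain ⟨h1, h2⟩ := List.cons.inj heq
    rw [h1, h2]

-- After emitting a ']' that is not followed by '[', the flag is irrelevant.
theorem bGo_true_false (cs : List Char) (h : ∀ r, cs ≠ '[' :: r) :
    bGo 0 true cs = bGo 0 false cs := by
  cases cs with
  | nil => rfl
  | cons c rest =>
      have hc : c ≠ '[' := by intro h'; exact h rest (by rw [h'])
      simp [bGo, hc]

theorem aLoop_eq_bGo (cs : List Char) : aLoop cs = bGo 0 false cs := by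
  induction cs using aLoop.induct with
  | case1 => simp [aLoop, bGo]
  | case2 rest ih =>
      rw [show aLoop (']' :: '[' :: rest) = ']' :: aLoop (aSkip 1 rest) from by
        rw [aLoop]]
      simp only [bGo]
      simp only [Nat.lt_irrefl, if_false, decide_true, Bool.false_eq_true, false_and, if_false,
        show ((']':Char) = '[') = False from by simp, and_false]
      simp only [if_true, List.cons.injEq, true_and]
      rw [bGo_skip rest 1 Nat.one_pos]
      exact ih
  | case3 c rest h1 ih =>
      rw [aLoop_cons c rest h1]
      simp only [bGo, Nat.lt_irrefl, if_false, Bool.false_eq_true, false_and, if_false,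
        List.cons.injEq, true_and]
      by_cases hc : c = ']'
      · subst hc
        rw [show (decide ((']':Char) = ']')) = true from by simp,
          bGo_true_false rest (fun r hr => h1 r rfl hr)]
        exact ih
      · rw [show (decide (c = ']')) = false from by simp [hc]]
        exact ih

-- ===== VERDICT (by name: the statement is the Claim_ definition above) =====
theorem optimize_successive_loops_spec : Claim_equal_optimize_successive_loops := by
  intro s _
  show _ = _
  unfold optimize_successive_loops optimize_successive_loops_alt
  rw [aLoop_eq_bGo]
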